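-- pv_equiv track=rewrite | github.com/GoLukeEnviro/Audio_Analyse_tool | src/playlist_engine/sorting_algorithms.py | sort_by_mood_flow
-- ===== SOURCE A (Python) =====
-- from typing import Dict, List, Any, Optional, Callable, Tuple
--
-- def sort_by_mood_flow(tracks: List[Dict[str, Any]], flow_type: str = 'emotional_journey', **kwargs) -> List[Dict[str, Any]]:
--     """Sortiert nach Stimmungs-Verlauf"""
--     if len(tracks) <= 1:
--         return tracks
--
--     # Definiere Stimmungs-Reihenfolgen
--     mood_orders = {
--         'emotional_journey': ['Dark', 'Experimental', 'Driving', 'Euphoric'],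
--         'energy_buildup': ['Experimental', 'Dark', 'Driving', 'Euphoric'],
--         'chill_to_peak': ['Dark', 'Driving', 'Experimental', 'Euphoric'],
--         'peak_to_chill': ['Euphoric', 'Driving', 'Experimental', 'Dark']
--     }
--
--     mood_order = mood_orders.get(flow_type, mood_orders['emotional_journey'])
--
--     # Gruppiere nach Stimmungen
--     mood_groups = {mood: [] for mood in mood_order}
--     tracks_without_mood = []
--
--     for track in tracks:
--         mood = track.get('mood')
--         if mood and mood in mood_groups:
--             mood_groups[mood].append(track)
--         else:
--             tracks_without_mood.append(track)
--
--     # Baue sortierte Liste auf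
--     sorted_tracks = []
--     for mood in mood_order:
--         sorted_tracks.extend(mood_groups[mood])
--
--     sorted_tracks.extend(tracks_without_mood)
--
--     return sorted_tracks
-- ===== SOURCE B (Python) =====
-- from typing import Dict, List, Any
--
-- def sort_by_mood_flow(tracks: List[Dict[str, Any]], flow_type: str = 'emotional_journey', **kwargs) -> List[Dict[str, Any]]:
--     """Sortiert nach Stimmungs-Verlauf: stable sort by the mood's rank in the flow order."""
--     if len(tracks) <= 1:
--         return tracks
--
--     mood_orders = {
--         'emotional_journey': ['Dark', 'Experimental', 'Driving', 'Euphoric'],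
--         'energy_buildup': ['Experimental', 'Dark', 'Driving', 'Euphoric'],
--         'chill_to_peak': ['Dark', 'Driving', 'Experimental', 'Euphoric'],
--         'peak_to_chill': ['Euphoric', 'Driving', 'Experimental', 'Dark']
--     }
--     mood_order = mood_orders.get(flow_type, mood_orders['emotional_journey'])
--     n = len(mood_order)
--
--     def rank(track):
--         mood = track.get('mood')
--         if mood and mood in mood_order:
--             return mood_order.index(mood)
--         return n
--
--     return sorted(tracks, key=rank)
-- ===== Notes on version B (the rewrite author's own statement) =====
-- stated objective: idiomatic
-- what changed: Replaced the explicit group-into-a-dict-of-buckets-then-concatenate pass by a single stable sort keyed on the mood's rank in the flow order (unknown/empty/missing moods rank last), relying on sort stability for intra-bucket order.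
import Mathlib
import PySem

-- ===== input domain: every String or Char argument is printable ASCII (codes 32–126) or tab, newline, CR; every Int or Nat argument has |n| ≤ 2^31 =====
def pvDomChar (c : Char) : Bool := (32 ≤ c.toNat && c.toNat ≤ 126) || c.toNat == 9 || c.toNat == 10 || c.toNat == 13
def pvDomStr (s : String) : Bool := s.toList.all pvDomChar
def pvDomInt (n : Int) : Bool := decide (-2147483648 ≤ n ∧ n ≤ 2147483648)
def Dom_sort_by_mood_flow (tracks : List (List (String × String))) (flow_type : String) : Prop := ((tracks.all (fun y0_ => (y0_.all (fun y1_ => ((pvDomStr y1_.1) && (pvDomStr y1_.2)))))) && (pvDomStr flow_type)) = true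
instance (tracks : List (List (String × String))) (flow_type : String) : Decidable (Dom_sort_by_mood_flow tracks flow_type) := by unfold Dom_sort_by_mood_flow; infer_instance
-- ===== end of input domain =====

-- B replaces A's group-into-dict-buckets-then-concatenate pass by one stable sort keyed on the
-- mood's rank in the flow order (idiomatic; same return value, no observable side effects in either).

-- ===== PORT A =====

-- track.get('mood') on the track dict (assoc list; first match)
def pvMoodGet (track : List (String × String)) : Option String :=
  (PySem.Dict.mk track).get? "mood"

-- the literal mood_orders dict (identical in A and Source B)
def pvMoodOrders : PySem.Dict String (List String) :=
  PySem.Dict.ofList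
    [("emotional_journey", ["Dark", "Experimental", "Driving", "Euphoric"]),
     ("energy_buildup", ["Experimental", "Dark", "Driving", "Euphoric"]),
     ("chill_to_peak", ["Dark", "Driving", "Experimental", "Euphoric"]),
     ("peak_to_chill", ["Euphoric", "Driving", "Experimental", "Dark"])]

-- the grouping loop body of A ('if mood and mood in mood_groups: bucket.append else: without.append')
def pvAStep (s : PySem.Dict String (List (List (String × String))) × List (List (String × String)))
    (track : List (String × String)) :
    PySem.Dict String (List (List (String × String))) × List (List (String × String)) :=
  match pvMoodGet track with
  | some m => if m ≠ "" && s.1.contains m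
              then (s.1.modify m [] (· ++ [track]), s.2)
              else (s.1, s.2 ++ [track])
  | none => (s.1, s.2 ++ [track])

def sort_by_mood_flow (tracks : List (List (String × String))) (flow_type : String) : List (List (String × String)) :=
  if tracks.length ≤ 1 then tracks
  else
    let mood_order := pvMoodOrders.getD flow_type (pvMoodOrders.getD "emotional_journey" [])
    -- mood_groups = {mood: [] for mood in mood_order}; tracks_without_mood = []
    let mood_groups := mood_order.foldl (fun d m => d.insert m ([] : List (List (String × String)))) PySem.Dict.empty
    let st := tracks.foldl pvAStep (mood_groups, [])
    -- sorted_tracks: extend bucket by bucket, then the tracks without (known) mood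
    let sorted_tracks := mood_order.foldl (fun acc m => acc ++ st.1.getD m []) []
    sorted_tracks ++ st.2

-- ===== PORT B =====

-- rank(track) of Source B; the list.index call is guarded by 'mood in mood_order', so the
-- '.getD 0' default is never reached (Python's .index would raise exactly when the guard fails)
def pvRank (order : List String) (track : List (String × String)) : Nat :=
  match pvMoodGet track with
  | some m => if m ≠ "" && order.contains m
              then (PySem.List.index? order m).getD 0
              else order.length
  | none => order.length

def sort_by_mood_flow_alt (tracks : List (List (String × String))) (flow_type : String) : List (List (String × String)) :=
  if tracks.length ≤ 1 then tracks
  else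
    let mood_order := pvMoodOrders.getD flow_type (pvMoodOrders.getD "emotional_journey" [])
    PySem.List.sorted tracks (pvRank mood_order) false

-- ===== PRECONDITION & SPEC =====
def Spec_sort_by_mood_flow (tracks : List (List (String × String))) (flow_type : String) (out : List (List (String × String))) : Prop := out = sort_by_mood_flow_alt tracks flow_type
instance (tracks : List (List (String × String))) (flow_type : String) (out : List (List (String × String))) : Decidable (Spec_sort_by_mood_flow tracks flow_type out) := by unfold Spec_sort_by_mood_flow; infer_instance

-- ===== CLAIM (what is proved, stated in full; the proofs are below) =====
def Claim_equal_sort_by_mood_flow : Prop := ∀ (tracks : List (List (String × String))) (flow_type : String), Dom_sort_by_mood_flow tracks flow_type → Spec_sort_by_mood_flow tracks flow_type (sort_by_mood_flow tracks flow_type)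

-- ===== LEMMAS AND PROOFS =====

-- the bucket condition: the track has a truthy mood that occurs in d / in the order
def pvCondD (d : PySem.Dict String (List (List (String × String)))) (track : List (String × String)) : Bool :=
  match pvMoodGet track with
  | some m => m ≠ "" && d.contains m
  | none => false

def pvCond (order : List String) (track : List (String × String)) : Bool :=
  match pvMoodGet track with
  | some m => m ≠ "" && order.contains m
  | none => false

-- A's initial mood_groups dict
def pvInit (order : List String) : PySem.Dict String (List (List (String × String))) :=
  order.foldl (fun d m => d.insert m ([] : List (List (String × String)))) PySem.Dict.empty

-- the bucketed arrangement of xs under a Nat key: key-0 elements, then key-1 elements, …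
def pvBuckets {α : Type} (k : α → Nat) (n : Nat) (xs : List α) : List α :=
  (List.range n).flatMap (fun v => xs.filter (fun x => k x == v))

theorem pvInsertBy_append_left {α : Type} (before : α → α → Bool) (x : α) (l1 l2 : List α)
    (h : ∀ y ∈ l1, before x y = false) :
    PySem.List.insertBy before x (l1 ++ l2) = l1 ++ PySem.List.insertBy before x l2 := by
  induction l1 with
  | nil => simp
  | cons a t ih =>
      have ha : before x a = false := h a (by simp)
      simp only [List.cons_append, PySem.List.insertBy, ha]
      simp [ih (fun y hy => h y (by simp [hy])), PySem.List.insertBy]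

theorem pvInsertBy_all_before {α : Type} (before : α → α → Bool) (x : α) (l : List α)
    (h : ∀ y ∈ l, before x y = true) :
    PySem.List.insertBy before x l = x :: l := by
  cases l with
  | nil => rfl
  | cons a t => simp [PySem.List.insertBy, h a (by simp)]

theorem pvInsertBy_buckets {α : Type} (k : α → Nat) (n : Nat) (x : α) (ys : List α)
    (hx : k x < n) :
    PySem.List.insertBy (fun a b => decide (k a < k b)) x (pvBuckets k n ys)
      = pvBuckets k n (ys ++ [x]) := by
  have hsplit : n = (k x + 1) + (n - (k x + 1)) := by omega
  have hrange : List.range n = List.range (k x + 1) ++ (List.range (n - (k x + 1))).map ((k x + 1) + ·) := by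
    conv_lhs => rw [hsplit]
    exact List.range_add
  -- the prefix P (keys ≤ k x) and suffix S (keys > k x) of the buckets of ys
  set P := (List.range (k x + 1)).flatMap (fun v => ys.filter (fun y => k y == v)) with hP
  set S := ((List.range (n - (k x + 1))).map ((k x + 1) + ·)).flatMap (fun v => ys.filter (fun y => k y == v)) with hS
  have hysbuck : pvBuckets k n ys = P ++ S := by
    rw [pvBuckets, hrange, List.flatMap_append]
  have hPmem : ∀ y ∈ P, (decide (k x < k y)) = false := by
    intro y hy
    simp only [hP, List.mem_flatMap, List.mem_range, List.mem_filter] at hy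
    obtain ⟨v, hv, _, hkv⟩ := hy
    simp only [beq_iff_eq] at hkv
    simp only [decide_eq_false_iff_not, not_lt]
    omega
  have hSmem : ∀ y ∈ S, (decide (k x < k y)) = true := by
    intro y hy
    simp only [hS, List.mem_flatMap, List.mem_map, List.mem_range, List.mem_filter] at hy
    obtain ⟨v, ⟨w, hw, hvw⟩, _, hkv⟩ := hy
    simp only [beq_iff_eq] at hkv
    simp only [decide_eq_true_eq]
    omega
  rw [hysbuck, pvInsertBy_append_left _ _ _ _ hPmem, pvInsertBy_all_before _ _ _ hSmem]
  -- now compute the buckets of ys ++ [x]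
  have hfilters : ∀ v, (ys ++ [x]).filter (fun y => k y == v)
      = ys.filter (fun y => k y == v) ++ (if k x = v then [x] else []) := by
    intro v
    rw [List.filter_append]
    by_cases hv : k x = v <;> simp [hv]
  rw [pvBuckets, hrange, List.flatMap_append]
  have hsuf : ((List.range (n - (k x + 1))).map ((k x + 1) + ·)).flatMap
      (fun v => (ys ++ [x]).filter (fun y => k y == v)) = S := by
    rw [hS]
    apply List.flatMap_congr  -- placeholder name; fixed below if wrong
    intro v hv
    simp only [List.mem_map, List.mem_range] at hv
    obtain ⟨w, hw, hvw⟩ := hv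
    rw [hfilters v, if_neg (by omega), List.append_nil]
  have hpre : (List.range (k x + 1)).flatMap (fun v => (ys ++ [x]).filter (fun y => k y == v))
      = P ++ [x] := by
    rw [List.range_succ, List.flatMap_append]
    simp only [List.flatMap_cons, List.flatMap_nil, List.append_nil]
    rw [hfilters (k x), if_pos rfl, hP, List.range_succ, List.flatMap_append]
    simp only [List.flatMap_cons, List.flatMap_nil, List.append_nil, List.append_assoc]
    congr 1
    · apply List.flatMap_congr
      intro v hv
      simp only [List.mem_range] at hv
      rw [hfilters v, if_neg (by omega), List.append_nil]
  rw [hsuf, hpre, List.append_assoc, List.singleton_append]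

theorem pvSorted_eq_buckets {α : Type} (k : α → Nat) (n : Nat) (xs : List α)
    (h : ∀ x ∈ xs, k x < n) :
    PySem.List.sorted xs k false = pvBuckets k n xs := by
  rw [PySem.List.sorted_eq_foldl_insertBy]
  have hnil : pvBuckets k n ([] : List α) = [] := by
    simp [pvBuckets]
  have main : ∀ (l ys : List α), (∀ x ∈ l, k x < n) →
      l.foldl (fun acc x => PySem.List.insertBy (fun a b => decide (k a < k b)) x acc) (pvBuckets k n ys)
        = pvBuckets k n (ys ++ l) := by
    intro l
    induction l with
    | nil => intro ys _; simp
    | cons a t ih =>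
        intro ys hl
        simp only [List.foldl_cons]
        rw [pvInsertBy_buckets k n a ys (hl a (by simp))]
        rw [ih (ys ++ [a]) (fun x hx => hl x (by simp [hx]))]
        simp
  have := main xs [] h
  rw [hnil] at this
  simpa using this

-- A's grouping loop, characterised: keys unchanged, rejects appended in order, bucket m
-- collects exactly the tracks whose mood is m
theorem pvALoop (tracks : List (List (String × String))) :
    ∀ (d : PySem.Dict String (List (List (String × String)))) (w : List (List (String × String))),
    (∀ x, (tracks.foldl pvAStep (d, w)).1.contains x = d.contains x) ∧
    ((tracks.foldl pvAStep (d, w)).2 = w ++ tracks.filter (fun t => !pvCondD d t)) ∧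
    (∀ m, (tracks.foldl pvAStep (d, w)).1.getD m [] =
      d.getD m [] ++ tracks.filter (fun t => pvCondD d t && (pvMoodGet t == some m))) := by
  induction tracks with
  | nil => intro d w; refine ⟨fun x => rfl, by simp, fun m => by simp⟩
  | cons t rest ih =>
      intro d w
      simp only [List.foldl_cons]
      rcases hm : pvMoodGet t with _ | m0
      · -- no 'mood' key: goes to tracks_without_mood
        have hstep : pvAStep (d, w) t = (d, w ++ [t]) := by
          simp [pvAStep, hm]
        rw [hstep]
        have hcnd : pvCondD d t = false := by simp [pvCondD, hm]
        obtain ⟨h1, h2, h3⟩ := ih d (w ++ [t])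
        refine ⟨h1, ?_, ?_⟩
        · rw [h2, List.filter_cons_of_pos (by simp [hcnd]), List.append_assoc, List.singleton_append]
        · intro m
          rw [h3 m, List.filter_cons_of_neg (by simp [hcnd])]
      · by_cases hcnd : (m0 ≠ "" && d.contains m0) = true
        · -- truthy mood present in the groups dict: appended to its bucket
          have hstep : pvAStep (d, w) t = (d.modify m0 [] (· ++ [t]), w) := by
            simp only [pvAStep, hm]
            rw [if_pos hcnd]
          rw [hstep]
          have hdm0 : d.contains m0 = true := by
            rcases Bool.and_eq_true_iff.mp hcnd with ⟨_, h⟩; exact h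
          set d' := d.modify m0 [] (· ++ [t]) with hd'
          have hcon : ∀ x, d'.contains x = d.contains x := by
            intro x
            rw [hd', PySem.Dict.contains_modify]
            by_cases hx : x == m0
            · simp only [hx, Bool.true_or]
              have : x = m0 := by simpa using hx
              rw [this, hdm0]
            · simp only [hx, Bool.false_or]
          have hcnd' : ∀ t', pvCondD d' t' = pvCondD d t' := by
            intro t'
            unfold pvCondD
            rcases pvMoodGet t' with _ | m' <;> simp [hcon]
          have hm0ne : ¬ m0 = "" := by simpa using (Bool.and_eq_true_iff.mp hcnd).1
          have hcondt : pvCondD d t = true := by simp [pvCondD, hm, hm0ne, hdm0]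
          obtain ⟨h1, h2, h3⟩ := ih d' w
          refine ⟨fun x => (h1 x).trans (hcon x), ?_, ?_⟩
          · rw [h2, List.filter_cons_of_neg (by simp [hcondt])]
            congr 1
            exact List.filter_congr (fun t' _ => by rw [hcnd' t'])
          · intro m
            rw [h3 m]
            have hgd : d'.getD m [] = if m = m0 then d.getD m0 [] ++ [t] else d.getD m [] := by
              rw [hd', PySem.Dict.getD_modify]
            by_cases hmm : m = m0
            · subst hmm
              rw [hgd, if_pos rfl, List.filter_cons_of_pos (by simp [hcondt, hm, hm0ne, hdm0]),
                List.append_assoc, List.singleton_append]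
              congr 2
              exact List.filter_congr (fun t' _ => by rw [hcnd' t'])
            · rw [hgd, if_neg hmm,
                List.filter_cons_of_neg (by simp [hcondt, hm]; exact fun h => hmm h.symm)]
              congr 1
              exact List.filter_congr (fun t' _ => by rw [hcnd' t'])
        · -- falsy or unknown mood: goes to tracks_without_mood
          have hstep : pvAStep (d, w) t = (d, w ++ [t]) := by
            simp only [pvAStep, hm]
            rw [if_neg hcnd]
          rw [hstep]
          have hcondt : pvCondD d t = false := by
            simp only [pvCondD, hm]
            exact Bool.not_eq_true _ ▸ (by simpa using hcnd)
          obtain ⟨h1, h2, h3⟩ := ih d (w ++ [t])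
          refine ⟨h1, ?_, ?_⟩
          · rw [h2, List.filter_cons_of_pos (by simp [hcondt]), List.append_assoc, List.singleton_append]
          · intro m
            rw [h3 m, List.filter_cons_of_neg (by simp [hcondt])]

theorem pvInit_contains (order : List String) (x : String) :
    (pvInit order).contains x = order.contains x := by
  have main : ∀ (l : List String) (d : PySem.Dict String (List (List (String × String)))),
      (l.foldl (fun d m => d.insert m ([] : List (List (String × String)))) d).contains x
        = (d.contains x || l.contains x) := by
    intro l
    induction l with
    | nil => intro d; simp
    | cons a t ih =>
        intro d
        simp only [List.foldl_cons]
        rw [ih, PySem.Dict.contains_insert]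
        by_cases hx : x = a
        · simp [hx]
        · have hxa : (x == a) = false := beq_eq_false_iff_ne.mpr hx
          simp [hxa, hx]
  rw [pvInit, main]
  simp

theorem pvInit_getD (order : List String) (m : String) :
    (pvInit order).getD m [] = [] := by
  have main : ∀ (l : List String) (d : PySem.Dict String (List (List (String × String)))),
      (∀ y, d.getD y [] = []) →
      (l.foldl (fun d m => d.insert m ([] : List (List (String × String)))) d).getD m [] = [] := by
    intro l
    induction l with
    | nil => intro d h; exact h m
    | cons a t ih =>
        intro d h
        simp only [List.foldl_cons]
        apply ih
        intro y
        rw [PySem.Dict.getD_insert]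
        by_cases hy : y = a <;> simp [hy, h y]
  exact main order PySem.Dict.empty (fun y => by simp)

theorem pvCondD_init (order : List String) (t : List (String × String)) :
    pvCondD (pvInit order) t = pvCond order t := by
  unfold pvCondD pvCond
  rcases pvMoodGet t with _ | m <;> simp [pvInit_contains]

theorem pvRank_lt (order : List String) (t : List (String × String)) :
    pvRank order t < order.length + 1 := by
  unfold pvRank
  rcases hm : pvMoodGet t with _ | m
  · dsimp only; omega
  · dsimp only
    by_cases hc : (m ≠ "" && order.contains m) = true
    · rw [if_pos hc]
      rcases Bool.and_eq_true_iff.mp hc with ⟨_, hmem⟩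
      have hmem' : m ∈ order := by simpa using hmem
      rcases (PySem.List.index?_isSome_iff order m).mpr hmem' |> Option.isSome_iff_exists.mp with ⟨i, hi⟩
      obtain ⟨hlt, _, _⟩ := PySem.List.getElem_of_index?_eq_some hi
      rw [hi]
      simpa using Nat.lt_succ_of_lt hlt
    · rw [if_neg hc]; omega

theorem pvRank_eq_len (order : List String) (t : List (String × String)) :
    (pvRank order t == order.length) = !pvCond order t := by
  unfold pvRank pvCond
  rcases hm : pvMoodGet t with _ | m
  · dsimp only; simp
  · dsimp only
    by_cases hc : (m ≠ "" && order.contains m) = true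
    · rw [if_pos hc, hc]
      rcases Bool.and_eq_true_iff.mp hc with ⟨_, hmem⟩
      have hmem' : m ∈ order := by simpa using hmem
      rcases (PySem.List.index?_isSome_iff order m).mpr hmem' |> Option.isSome_iff_exists.mp with ⟨i, hi⟩
      obtain ⟨hlt, _, _⟩ := PySem.List.getElem_of_index?_eq_some hi
      rw [hi]
      simp only [Option.getD_some, Bool.not_true]
      simpa using Nat.ne_of_lt hlt
    · rw [if_neg hc]
      have hcf : (decide (m ≠ "") && order.contains m) = false := by simpa using hc
      rw [hcf]
      simp

theorem pvRank_eq_v (order : List String) (hnd : order.Nodup) (v : Nat) (hv : v < order.length)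
    (t : List (String × String)) :
    (pvRank order t == v) = (pvCond order t && (pvMoodGet t == some (order.getD v ""))) := by
  unfold pvRank pvCond
  rcases hm : pvMoodGet t with _ | m
  · dsimp only [Bool.false_and]
    simpa using Nat.ne_of_gt hv
  · dsimp only
    by_cases hc : (m ≠ "" && order.contains m) = true
    · rw [if_pos hc, hc]
      rcases Bool.and_eq_true_iff.mp hc with ⟨_, hmem⟩
      have hmem' : m ∈ order := by simpa using hmem
      rcases (PySem.List.index?_isSome_iff order m).mpr hmem' |> Option.isSome_iff_exists.mp with ⟨i, hi⟩
      obtain ⟨hlt, hgot, _⟩ := PySem.List.getElem_of_index?_eq_some hi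
      rw [hi]
      simp only [Option.getD_some, Bool.true_and]
      have hgetD : order.getD v "" = order[v] := List.getD_eq_getElem order "" hv
      by_cases hiv : i = v
      · subst hiv
        simp [hgetD, ← hgot, List.getElem?_eq_getElem hlt]
      · have hne : m ≠ order[v] := by
          intro hcontra
          apply hiv
          have : order[i] = order[v] := by rw [hgot, hcontra]
          exact (List.Nodup.getElem_inj_iff hnd).mp this
        simp [hgetD, hiv, hne, List.getElem?_eq_getElem hv]
    · rw [if_neg hc]
      have : (m ≠ "" && order.contains m) = false := by simpa using hc
      rw [this]
      simp only [Bool.false_and]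
      simpa using Nat.ne_of_gt hv

theorem pvIdxFlatMap {β : Type} (l : List String) (g : String → List β) :
    (List.range l.length).flatMap (fun i => g (l.getD i "")) = l.flatMap g := by
  induction l with
  | nil => simp
  | cons a t ih =>
      rw [List.length_cons, List.range_succ_eq_map, List.flatMap_cons, List.flatMap_map]
      simp only [List.getD_cons_zero, Function.comp_def, List.getD_cons_succ]
      rw [ih, List.flatMap_cons]

-- the generic fact: A's grouped concatenation IS the stable sort by rank
theorem pvGeneric (order : List String) (hnd : order.Nodup)
    (tracks : List (List (String × String))) :
    (order.foldl (fun acc m => acc ++ (tracks.foldl pvAStep (pvInit order, [])).1.getD m []) [])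
      ++ (tracks.foldl pvAStep (pvInit order, [])).2
    = PySem.List.sorted tracks (pvRank order) false := by
  obtain ⟨_, h2, h3⟩ := pvALoop tracks (pvInit order) []
  rw [PySem.List.foldl_append_eq_flatMap, List.nil_append, h2, List.nil_append]
  rw [pvSorted_eq_buckets (pvRank order) (order.length + 1) tracks (fun t _ => pvRank_lt order t)]
  rw [pvBuckets, List.range_succ, List.flatMap_append, List.flatMap_cons, List.flatMap_nil,
    List.append_nil]
  congr 1
  · -- the buckets part
    have hcongr : ∀ m, (tracks.foldl pvAStep (pvInit order, [])).1.getD m []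
        = tracks.filter (fun t => pvCond order t && (pvMoodGet t == some m)) := by
      intro m
      rw [h3 m, pvInit_getD, List.nil_append]
      exact List.filter_congr (fun t _ => by rw [pvCondD_init])
    calc order.flatMap (fun m => (tracks.foldl pvAStep (pvInit order, [])).1.getD m [])
        = order.flatMap (fun m => tracks.filter (fun t => pvCond order t && (pvMoodGet t == some m))) := by
          exact List.flatMap_congr (fun m _ => hcongr m)
      _ = (List.range order.length).flatMap
            (fun v => tracks.filter (fun t => pvCond order t && (pvMoodGet t == some (order.getD v "")))) := by
          exact (pvIdxFlatMap order (fun m => tracks.filter (fun t => pvCond order t && (pvMoodGet t == some m)))).symm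
      _ = (List.range order.length).flatMap (fun v => tracks.filter (fun t => pvRank order t == v)) := by
          apply List.flatMap_congr
          intro v hv
          exact (List.filter_congr (fun t _ =>
            (pvRank_eq_v order hnd v (List.mem_range.mp hv) t))).symm
  · -- the tracks_without_mood part
    apply List.filter_congr
    intro t _
    rw [pvCondD_init]
    exact (pvRank_eq_len order t).symm

theorem pvOrder_nodup (flow_type : String) :
    (pvMoodOrders.getD flow_type (pvMoodOrders.getD "emotional_journey" [])).Nodup := by
  rw [PySem.Dict.getD_eq_get?_getD]
  rcases h : pvMoodOrders.get? flow_type with _ | o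
  · simp only [Option.getD_none]
    decide
  · simp only [Option.getD_some]
    have hmem := PySem.Dict.mem_items_of_get?_eq_some _ h
    have hval : o ∈ pvMoodOrders.items.map (·.2) := List.mem_map.mpr ⟨_, hmem, rfl⟩
    have hits : pvMoodOrders.items.map (·.2) =
        [["Dark", "Experimental", "Driving", "Euphoric"],
         ["Experimental", "Dark", "Driving", "Euphoric"],
         ["Dark", "Driving", "Experimental", "Euphoric"],
         ["Euphoric", "Driving", "Experimental", "Dark"]] := by decide
    rw [hits] at hval
    simp only [List.mem_cons, List.not_mem_nil, or_false] at hval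
    rcases hval with h' | h' | h' | h' <;> subst h' <;> decide

-- ===== VERDICT (by name: the statement is the Claim_ definition above) =====
theorem sort_by_mood_flow_spec : Claim_equal_sort_by_mood_flow := by
  intro tracks flow_type _
  unfold Spec_sort_by_mood_flow sort_by_mood_flow sort_by_mood_flow_alt
  by_cases hlen : tracks.length ≤ 1
  · rw [if_pos hlen, if_pos hlen]
  · rw [if_neg hlen, if_neg hlen]
    exact pvGeneric _ (pvOrder_nodup flow_type) tracks
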